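-- pv_equiv track=rewrite | github.com/lunaryan/parafuzz | RAP/HiddenKiller/generate_poison_data/get_parse_tree_frequency.py | get_pov
-- ===== SOURCE A (Python) =====
-- from collections import OrderedDict, Counter
--
-- PRONOUN_POS = set(['PRP', 'PRP$'])
--
-- FIRST = set(['i', 'me', 'mine', 'we', 'us', 'ours', 'our'])
--
-- SECOND = set(['you', 'yours', 'your'])
--
-- THIRD = set(['he', 'she', 'it', 'him', 'her', 'his', 'hers', 'its', 'they', 'them', 'their', 'theirs'])
--
-- def get_pov(tokens, pos_tags):
--
--     c = Counter()
--     for idx, pos in enumerate(pos_tags):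
--
--         #'I' not detected as PRP but instead as LS or FW...
--         pro = tokens[idx]
--         if pos in PRONOUN_POS or pro == 'i':
--             if pro in FIRST:
--                 c['FIRST'] += 1
--             elif pro in SECOND:
--                 c['SECOND'] += 1
--             elif pro in THIRD:
--                 c['THIRD'] += 1
--
--
--     if len(c) == 0:
--         return 'UNK'
--
--     # first person dominates, then second, then third
--     if c['FIRST'] > 0:
--         return 'FIRST'
--     elif c['SECOND'] > 0:
--         return 'SECOND'
--     else:
--         return 'THIRD'
-- ===== SOURCE B (Python) =====
-- PRONOUN_POS = set(['PRP', 'PRP$'])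
--
-- FIRST = set(['i', 'me', 'mine', 'we', 'us', 'ours', 'our'])
--
-- SECOND = set(['you', 'yours', 'your'])
--
-- THIRD = set(['he', 'she', 'it', 'him', 'her', 'his', 'hers', 'its', 'they', 'them', 'their', 'theirs'])
--
-- def get_pov(tokens, pos_tags):
--     # filter once: the pronoun candidates, keeping the tokens[i] access of the original
--     candidates = [tokens[i] for i in range(len(pos_tags))
--                   if pos_tags[i] in PRONOUN_POS or tokens[i] == 'i']
--     # then answer by priority with plain presence probes, no Counter
--     if any(w in FIRST for w in candidates):
--         return 'FIRST'
--     if any(w in SECOND for w in candidates):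
--         return 'SECOND'
--     if any(w in THIRD for w in candidates):
--         return 'THIRD'
--     return 'UNK'
-- ===== Notes on version B (the rewrite author's own statement) =====
-- stated objective: simpler
-- what changed: Replaces the count-then-dominance Counter loop with a single pronoun-candidate filter followed by three priority presence probes (any w in FIRST/SECOND/THIRD), with no counter state at all.
import Mathlib
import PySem

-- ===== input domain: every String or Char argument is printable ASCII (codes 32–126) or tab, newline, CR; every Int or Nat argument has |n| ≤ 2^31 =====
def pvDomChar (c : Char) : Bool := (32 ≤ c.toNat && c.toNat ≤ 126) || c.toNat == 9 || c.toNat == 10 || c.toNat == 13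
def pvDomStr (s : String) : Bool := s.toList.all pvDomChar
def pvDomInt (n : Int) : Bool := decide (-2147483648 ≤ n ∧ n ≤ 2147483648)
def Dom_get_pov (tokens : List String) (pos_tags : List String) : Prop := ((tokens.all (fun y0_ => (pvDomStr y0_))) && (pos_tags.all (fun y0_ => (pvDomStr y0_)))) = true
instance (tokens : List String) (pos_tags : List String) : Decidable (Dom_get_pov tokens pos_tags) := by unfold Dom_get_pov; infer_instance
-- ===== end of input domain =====

-- B replaces A's Counter/count-then-dominance loop by one candidate filter and three
-- priority presence probes; objective: simpler. Same return value wherever A returns.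

-- module constants (shared by both Python versions)
def PRONOUN_POS_set : PySem.Set String := PySem.Set.ofList ["PRP", "PRP$"]
def FIRST_set : PySem.Set String := PySem.Set.ofList ["i", "me", "mine", "we", "us", "ours", "our"]
def SECOND_set : PySem.Set String := PySem.Set.ofList ["you", "yours", "your"]
def THIRD_set : PySem.Set String := PySem.Set.ofList ["he", "she", "it", "him", "her", "his", "hers", "its", "they", "them", "their", "theirs"]

-- ===== PORT A =====
-- tokens[idx] is PySem.List.pyGet?; inside Pre_ the index is in range, so .getD "" is never taken
def get_pov (tokens : List String) (pos_tags : List String) : String :=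
  let c := (PySem.List.enumerate pos_tags 0).foldl (fun c ip =>
      let pro := (PySem.List.pyGet? tokens ip.1).getD ""
      if ip.2 ∈ PRONOUN_POS_set ∨ pro = "i" then
        if pro ∈ FIRST_set then c.modify "FIRST" 0 (· + 1)
        else if pro ∈ SECOND_set then c.modify "SECOND" 0 (· + 1)
        else if pro ∈ THIRD_set then c.modify "THIRD" 0 (· + 1)
        else c
      else c) (PySem.Dict.empty : PySem.Dict String Int)
  if c.size = 0 then "UNK"
  else if c.getD "FIRST" 0 > 0 then "FIRST"
  else if c.getD "SECOND" 0 > 0 then "SECOND"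
  else "THIRD"

-- ===== PORT B =====
def get_pov_alt (tokens : List String) (pos_tags : List String) : String :=
  let candidates := (PySem.List.pyRange 0 pos_tags.length 1).filterMap (fun i =>
      if (PySem.List.pyGet? pos_tags i).getD "" ∈ PRONOUN_POS_set ∨ (PySem.List.pyGet? tokens i).getD "" = "i"
      then some ((PySem.List.pyGet? tokens i).getD "") else none)
  if candidates.any (fun w => FIRST_set.contains w) then "FIRST"
  else if candidates.any (fun w => SECOND_set.contains w) then "SECOND"
  else if candidates.any (fun w => THIRD_set.contains w) then "THIRD"
  else "UNK"

-- ===== PRECONDITION & SPEC =====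
-- Pre_ excludes only the inputs where both Pythons raise IndexError: pos_tags longer than tokens.
def Pre_get_pov (tokens : List String) (pos_tags : List String) : Prop :=
  pos_tags.length ≤ tokens.length
instance (tokens : List String) (pos_tags : List String) : Decidable (Pre_get_pov tokens pos_tags) := by unfold Pre_get_pov; infer_instance
def pvWitness_get_pov : List String × List String := (["i", "saw", "them"], ["LS", "VBD", "PRP"])
def Spec_get_pov (tokens : List String) (pos_tags : List String) (out : String) : Prop := out = get_pov_alt tokens pos_tags
instance (tokens : List String) (pos_tags : List String) (out : String) : Decidable (Spec_get_pov tokens pos_tags out) := by unfold Spec_get_pov; infer_instance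

-- ===== CLAIM (what is proved, stated in full; the proofs are below) =====
def Claim_equal_get_pov : Prop := ∀ (tokens : List String) (pos_tags : List String), Dom_get_pov tokens pos_tags → Pre_get_pov tokens pos_tags → Spec_get_pov tokens pos_tags (get_pov tokens pos_tags)

-- ===== LEMMAS AND PROOFS =====


-- the shared loop body, factored for the proofs
def stepC (c : PySem.Dict String Int) (pro : String) : PySem.Dict String Int :=
  if pro ∈ FIRST_set then c.modify "FIRST" 0 (· + 1)
  else if pro ∈ SECOND_set then c.modify "SECOND" 0 (· + 1)
  else if pro ∈ THIRD_set then c.modify "THIRD" 0 (· + 1)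
  else c

-- B's candidate list, named for the proofs
def cands (tokens : List String) (pos_tags : List String) : List String :=
  (PySem.List.pyRange 0 pos_tags.length 1).filterMap (fun i =>
      if (PySem.List.pyGet? pos_tags i).getD "" ∈ PRONOUN_POS_set ∨ (PySem.List.pyGet? tokens i).getD "" = "i"
      then some ((PySem.List.pyGet? tokens i).getD "") else none)

def noCat (w : String) : Prop := w ∉ FIRST_set ∧ w ∉ SECOND_set ∧ w ∉ THIRD_set

-- A's final dominance decision, factored for the proofs
def verdictA (c : PySem.Dict String Int) : String :=
  if c.size = 0 then "UNK"
  else if c.getD "FIRST" 0 > 0 then "FIRST"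
  else if c.getD "SECOND" 0 > 0 then "SECOND"
  else "THIRD"

lemma modify_keys_ne_nil (d : PySem.Dict String Int) (k : String) (d0 : Int) (f : Int → Int) :
    (d.modify k d0 f).keys ≠ [] := by
  rw [PySem.Dict.keys_modify]
  by_cases h : d.contains k = true
  · rw [PySem.Dict.keys_insert_of_contains _ _ h]
    intro hnil
    have hk := (PySem.Dict.contains_iff_mem_keys d k).mp h
    simp [hnil] at hk
  · rw [PySem.Dict.keys_insert_of_not_contains _ _ (by simpa using h)]
    simp

-- A's enumerate-loop over (idx, pos) is the candidate-filtered loop of the shared body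
lemma foldA_eq (tokens pos_tags : List String) :
    (PySem.List.enumerate pos_tags 0).foldl (fun c ip =>
      let pro := (PySem.List.pyGet? tokens ip.1).getD ""
      if ip.2 ∈ PRONOUN_POS_set ∨ pro = "i" then
        if pro ∈ FIRST_set then c.modify "FIRST" 0 (· + 1)
        else if pro ∈ SECOND_set then c.modify "SECOND" 0 (· + 1)
        else if pro ∈ THIRD_set then c.modify "THIRD" 0 (· + 1)
        else c
      else c) (PySem.Dict.empty : PySem.Dict String Int)
    = (cands tokens pos_tags).foldl stepC PySem.Dict.empty := by
  rw [show PySem.List.enumerate pos_tags 0 = PySem.List.enumerate pos_tags from rfl,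
      PySem.List.enumerate_eq_map_pyRange pos_tags "", List.foldl_map]
  unfold cands
  rw [List.foldl_filterMap]
  apply PySem.List.foldl_congr_mem
  intro c i _
  by_cases h : (PySem.List.pyGet? pos_tags i).getD "" ∈ PRONOUN_POS_set ∨ (PySem.List.pyGet? tokens i).getD "" = "i" <;>
    simp [stepC, h, PySem.List.pyGetD]

-- the counter state after the loop, characterised against the candidate list
lemma fold_char (ws : List String) : ∀ (c : PySem.Dict String Int),
    ((ws.foldl stepC c).getD "FIRST" 0 = c.getD "FIRST" 0 + (ws.countP (fun w => decide (w ∈ FIRST_set)) : Int))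
  ∧ ((ws.foldl stepC c).getD "SECOND" 0 = c.getD "SECOND" 0 + (ws.countP (fun w => decide (w ∉ FIRST_set ∧ w ∈ SECOND_set)) : Int))
  ∧ ((ws.foldl stepC c).keys = [] ↔ c.keys = [] ∧ ∀ w ∈ ws, noCat w) := by
  induction ws with
  | nil => intro c; simp
  | cons w ws ih =>
    intro c
    obtain ⟨ih1, ih2, ih3⟩ := ih (stepC c w)
    simp only [List.foldl_cons, List.countP_cons]
    by_cases hF : w ∈ FIRST_set
    · have hc : stepC c w = c.modify "FIRST" 0 (· + 1) := by simp [stepC, hF]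
      refine ⟨?_, ?_, ?_⟩
      · rw [ih1, hc, PySem.Dict.getD_modify_self]
        simp [hF]; ring
      · rw [ih2, hc, PySem.Dict.getD_modify_of_ne _ _ _ (by decide)]
        simp [hF]
      · rw [ih3, hc]
        constructor
        · rintro ⟨hnil, -⟩; exact absurd hnil (modify_keys_ne_nil _ _ _ _)
        · rintro ⟨-, hall⟩; exact absurd hF (hall w (by simp)).1
    · by_cases hS : w ∈ SECOND_set
      · have hc : stepC c w = c.modify "SECOND" 0 (· + 1) := by simp [stepC, hF, hS]
        refine ⟨?_, ?_, ?_⟩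
        · rw [ih1, hc, PySem.Dict.getD_modify_of_ne _ _ _ (by decide)]
          simp [hF]
        · rw [ih2, hc, PySem.Dict.getD_modify_self]
          simp [hF, hS]; ring
        · rw [ih3, hc]
          constructor
          · rintro ⟨hnil, -⟩; exact absurd hnil (modify_keys_ne_nil _ _ _ _)
          · rintro ⟨-, hall⟩; exact absurd hS (hall w (by simp)).2.1
      · by_cases hT : w ∈ THIRD_set
        · have hc : stepC c w = c.modify "THIRD" 0 (· + 1) := by simp [stepC, hF, hS, hT]
          refine ⟨?_, ?_, ?_⟩
          · rw [ih1, hc, PySem.Dict.getD_modify_of_ne _ _ _ (by decide)]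
            simp [hF]
          · rw [ih2, hc, PySem.Dict.getD_modify_of_ne _ _ _ (by decide)]
            simp [hS]
          · rw [ih3, hc]
            constructor
            · rintro ⟨hnil, -⟩; exact absurd hnil (modify_keys_ne_nil _ _ _ _)
            · rintro ⟨-, hall⟩; exact absurd hT (hall w (by simp)).2.2
        · have hc : stepC c w = c := by simp [stepC, hF, hS, hT]
          rw [hc] at ih1 ih2 ih3 ⊢
          refine ⟨by rw [ih1]; simp [hF], by rw [ih2]; simp [hS], ?_⟩
          rw [ih3]
          constructor
          · rintro ⟨hnil, hall⟩
            refine ⟨hnil, fun v hv => ?_⟩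
            rcases List.mem_cons.mp hv with rfl | hv'
            · exact ⟨hF, hS, hT⟩
            · exact hall v hv'
          · rintro ⟨hnil, hall⟩
            exact ⟨hnil, fun v hv => hall v (by simp [hv])⟩

-- the three category sets are pairwise disjoint (literal lists)
lemma S_not_F (w : String) (h : w ∈ SECOND_set) : w ∉ FIRST_set := by
  rw [show SECOND_set = ["you", "yours", "your"] from by decide] at h
  simp at h
  rcases h with rfl | rfl | rfl <;> decide

-- A's whole body, re-associated through verdictA (definitional)
lemma getpov_eq (tokens pos_tags : List String) :
    get_pov tokens pos_tags
    = verdictA ((PySem.List.enumerate pos_tags 0).foldl (fun c ip =>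
      let pro := (PySem.List.pyGet? tokens ip.1).getD ""
      if ip.2 ∈ PRONOUN_POS_set ∨ pro = "i" then
        if pro ∈ FIRST_set then c.modify "FIRST" 0 (· + 1)
        else if pro ∈ SECOND_set then c.modify "SECOND" 0 (· + 1)
        else if pro ∈ THIRD_set then c.modify "THIRD" 0 (· + 1)
        else c
      else c) (PySem.Dict.empty : PySem.Dict String Int)) := rfl

-- A's verdict over the final counter equals B's three presence probes
lemma verdict_eq (ws : List String) :
    verdictA (ws.foldl stepC PySem.Dict.empty)
    = (if ws.any (fun w => FIRST_set.contains w) then "FIRST"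
       else if ws.any (fun w => SECOND_set.contains w) then "SECOND"
       else if ws.any (fun w => THIRD_set.contains w) then "THIRD"
       else "UNK") := by
  unfold verdictA
  obtain ⟨h1, h2, h3⟩ := fold_char ws PySem.Dict.empty
  have hsize : (ws.foldl stepC PySem.Dict.empty).size = (ws.foldl stepC PySem.Dict.empty).keys.length := by
    simp [PySem.Dict.size, PySem.Dict.keys]
  have hanyF : ws.any (fun w => FIRST_set.contains w) = true ↔ ∃ w ∈ ws, w ∈ FIRST_set := by
    simp [List.any_eq_true]
  have hanyS : ws.any (fun w => SECOND_set.contains w) = true ↔ ∃ w ∈ ws, w ∈ SECOND_set := by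
    simp [List.any_eq_true]
  have hanyT : ws.any (fun w => THIRD_set.contains w) = true ↔ ∃ w ∈ ws, w ∈ THIRD_set := by
    simp [List.any_eq_true]
  by_cases hnil : (ws.foldl stepC PySem.Dict.empty).keys = []
  · obtain ⟨-, hall⟩ := h3.mp hnil
    have hF : ¬ ws.any (fun w => FIRST_set.contains w) = true := by
      rw [hanyF]; rintro ⟨w, hw, hmem⟩; exact (hall w hw).1 hmem
    have hS : ¬ ws.any (fun w => SECOND_set.contains w) = true := by
      rw [hanyS]; rintro ⟨w, hw, hmem⟩; exact (hall w hw).2.1 hmem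
    have hT : ¬ ws.any (fun w => THIRD_set.contains w) = true := by
      rw [hanyT]; rintro ⟨w, hw, hmem⟩; exact (hall w hw).2.2 hmem
    rw [if_pos (by rw [hsize, hnil]; rfl), if_neg hF, if_neg hS, if_neg hT]
  · rw [if_neg (by rw [hsize]; simpa using hnil)]
    by_cases hposF : (ws.foldl stepC PySem.Dict.empty).getD "FIRST" 0 > 0
    · have : ∃ w ∈ ws, decide (w ∈ FIRST_set) = true := by
        apply List.countP_pos_iff.mp
        have := h1; rw [PySem.Dict.getD_empty] at this
        omega
      rw [if_pos hposF, if_pos (hanyF.mpr (by simpa using this))]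
    · have hcF : (ws.countP (fun w => decide (w ∈ FIRST_set)) : Int) = 0 := by
        rw [h1, PySem.Dict.getD_empty] at hposF; omega
      have hnoF : ¬ ws.any (fun w => FIRST_set.contains w) = true := by
        rw [hanyF]; rintro ⟨w, hw, hmem⟩
        have : 0 < ws.countP (fun w => decide (w ∈ FIRST_set)) :=
          List.countP_pos_iff.mpr ⟨w, hw, by simpa using hmem⟩
        omega
      rw [if_neg hposF, if_neg hnoF]
      by_cases hposS : (ws.foldl stepC PySem.Dict.empty).getD "SECOND" 0 > 0
      · have : ∃ w ∈ ws, decide (w ∉ FIRST_set ∧ w ∈ SECOND_set) = true := by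
          apply List.countP_pos_iff.mp
          have := h2; rw [PySem.Dict.getD_empty] at this
          omega
        obtain ⟨w, hw, hmem⟩ := this
        have hmem' := of_decide_eq_true hmem
        rw [if_pos hposS, if_pos (hanyS.mpr ⟨w, hw, hmem'.2⟩)]
      · have hnoS : ¬ ws.any (fun w => SECOND_set.contains w) = true := by
          rw [hanyS]; rintro ⟨w, hw, hmem⟩
          have : 0 < ws.countP (fun w => decide (w ∉ FIRST_set ∧ w ∈ SECOND_set)) :=
            List.countP_pos_iff.mpr ⟨w, hw, by simp [hmem, S_not_F w hmem]⟩
          rw [h2, PySem.Dict.getD_empty] at hposS; omega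
        rw [if_neg hposS, if_neg hnoS]
        -- keys nonempty and no FIRST/SECOND hit: some candidate is THIRD
        have hex : ∃ w ∈ ws, ¬ noCat w := by
          by_contra hno
          push Not at hno
          exact hnil (h3.mpr ⟨PySem.Dict.keys_empty, hno⟩)
        obtain ⟨w, hw, hcat⟩ := hex
        have hwT : w ∈ THIRD_set := by
          unfold noCat at hcat
          by_cases hF' : w ∈ FIRST_set
          · exact absurd (hanyF.mpr ⟨w, hw, hF'⟩) hnoF
          by_cases hS' : w ∈ SECOND_set
          · exact absurd (hanyS.mpr ⟨w, hw, hS'⟩) hnoS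
          tauto
        rw [if_pos (hanyT.mpr ⟨w, hw, hwT⟩)]

-- ===== VERDICT (by name: the statement is the Claim_ definition above) =====
theorem get_pov_spec : Claim_equal_get_pov := by
  intro tokens pos_tags _ _
  show get_pov tokens pos_tags = get_pov_alt tokens pos_tags
  rw [getpov_eq, foldA_eq]
  exact verdict_eq (cands tokens pos_tags)
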